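-- pv_equiv track=rewrite | github.com/Bauti3230/teoria-de-algoritmos | Guias/programacion_dinamica/ej1.py | terrenos_contiguos
-- ===== SOURCE A (Python) =====
-- def terrenos_contiguos(terrenos):
--     n = len(terrenos)
--
--     OPT = [0] * n
--     reco = [0] * n
--
--     OPT[0] = terrenos[0]
--     reco[0] = -1
--
--     for i in range(1,n):
--         OPT[i] = max(terrenos[i],OPT[i-1] + terrenos[i])
--
--         if terrenos[i] >= OPT[i-1] + terrenos[i]:
--             reco[i] = -1
--         else :
--             reco[i] = i-1
--
--     return OPT[n-1],reco
-- ===== SOURCE B (Python) =====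
-- def terrenos_contiguos(terrenos):
--     # Prefix-sum formulation: the best sum ending at i is pref[i+1] minus the
--     # minimum prefix sum among pref[0..i]; a segment restarts at i exactly when
--     # pref[i] is (weakly) a new prefix minimum.
--     pref = [0]
--     for t in terrenos:
--         pref.append(pref[-1] + t)
--     reco = [-1]
--     m = pref[0]  # min of pref[0..i-1] during iteration i
--     for i in range(1, len(terrenos)):
--         reco.append(-1 if pref[i] <= m else i - 1)
--         m = min(m, pref[i])
--     return pref[len(terrenos)] - m, reco
-- ===== Notes on version B (the rewrite author's own statement) =====
-- stated objective: alternative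
-- what changed: Replaces the Kadane DP recurrence (OPT[i]=max(t[i],OPT[i-1]+t[i])) by a prefix-sum characterization: build the prefix-sum array, track the running minimum prefix, return pref[n]-min and mark a restart exactly where pref[i] is a weakly new prefix minimum; no DP array and no max recurrence remain.
import Mathlib
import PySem

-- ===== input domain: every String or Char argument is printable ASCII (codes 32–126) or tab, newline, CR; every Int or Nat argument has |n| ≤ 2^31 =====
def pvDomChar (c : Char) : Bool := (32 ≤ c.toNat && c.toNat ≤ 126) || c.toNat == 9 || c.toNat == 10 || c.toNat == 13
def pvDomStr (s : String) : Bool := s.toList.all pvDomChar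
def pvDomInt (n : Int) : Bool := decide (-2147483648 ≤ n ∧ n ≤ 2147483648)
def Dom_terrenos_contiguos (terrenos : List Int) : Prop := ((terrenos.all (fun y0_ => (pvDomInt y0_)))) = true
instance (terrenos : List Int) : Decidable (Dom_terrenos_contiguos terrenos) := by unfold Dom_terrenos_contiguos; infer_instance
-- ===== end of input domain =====

-- B drops the Kadane DP recurrence entirely: it builds the prefix-sum array, tracks the running
-- minimum prefix, returns pref[n] - min and restarts where pref[i] is a weakly new prefix minimum.

-- ===== PORT A =====
-- loop body of A's 'for i in range(1,n)'; the reads OPT[i-1] happen before index i is written,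
-- so reading st.1 (the list at loop entry) is exact.
def pvALoop (terrenos : List Int) (st : List Int × List Int) (i : Int) : List Int × List Int :=
  let OPT := PySem.List.pySetD st.1 i
      (max (PySem.List.pyGetD terrenos i 0)
           (PySem.List.pyGetD st.1 (i - 1) 0 + PySem.List.pyGetD terrenos i 0))
  let reco :=
    if PySem.List.pyGetD terrenos i 0 ≥
        PySem.List.pyGetD st.1 (i - 1) 0 + PySem.List.pyGetD terrenos i 0 then
      PySem.List.pySetD st.2 i (-1)
    else
      PySem.List.pySetD st.2 i (i - 1)
  (OPT, reco)

def terrenos_contiguos (terrenos : List Int) : Int × List Int :=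
  let n : Int := terrenos.length
  let OPT : List Int := List.replicate terrenos.length 0
  let reco : List Int := List.replicate terrenos.length 0
  let OPT := PySem.List.pySetD OPT 0 (PySem.List.pyGetD terrenos 0 0)
  let reco := PySem.List.pySetD reco 0 (-1)
  let st := (PySem.List.pyRange 1 n 1).foldl (pvALoop terrenos) (OPT, reco)
  (PySem.List.pyGetD st.1 (n - 1) 0, st.2)

-- ===== PORT B =====
-- loop body of B's 'for t in terrenos': pref.append(pref[-1] + t)
def pvPrefStep (pr : List Int) (t : Int) : List Int :=
  pr ++ [PySem.List.pyGetD pr (-1) 0 + t]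

-- loop body of B's 'for i in range(1, len(terrenos))': state = (reco so far, running min m)
def pvBLoop (pref : List Int) (st : List Int × Int) (i : Int) : List Int × Int :=
  let reco := st.1 ++ [if PySem.List.pyGetD pref i 0 ≤ st.2 then (-1 : Int) else i - 1]
  let m := min st.2 (PySem.List.pyGetD pref i 0)
  (reco, m)

def terrenos_contiguos_alt (terrenos : List Int) : Int × List Int :=
  let pref := terrenos.foldl pvPrefStep [0]
  let st := (PySem.List.pyRange 1 terrenos.length 1).foldl (pvBLoop pref)
      ([(-1 : Int)], PySem.List.pyGetD pref 0 0)
  (PySem.List.pyGetD pref (terrenos.length : Int) 0 - st.2, st.1)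

-- ===== PRECONDITION & SPEC =====
-- A raises IndexError (terrenos[0]) on the empty list; excluded.
def Pre_terrenos_contiguos (terrenos : List Int) : Prop := terrenos ≠ []
instance (terrenos : List Int) : Decidable (Pre_terrenos_contiguos terrenos) := by
  unfold Pre_terrenos_contiguos; infer_instance
def pvWitness_terrenos_contiguos : List Int := [2, -3, 4, 1]

def Spec_terrenos_contiguos (terrenos : List Int) (out : Int × List Int) : Prop :=
  out = terrenos_contiguos_alt terrenos
instance (terrenos : List Int) (out : Int × List Int) : Decidable (Spec_terrenos_contiguos terrenos out) := by
  unfold Spec_terrenos_contiguos; infer_instance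

-- ===== CLAIM (what is proved, stated in full; the proofs are below) =====
def Claim_equal_terrenos_contiguos : Prop := ∀ (terrenos : List Int), Dom_terrenos_contiguos terrenos → Pre_terrenos_contiguos terrenos → Spec_terrenos_contiguos terrenos (terrenos_contiguos terrenos)

-- ===== LEMMAS AND PROOFS =====

-- the stream of Kadane DP values, a characterisation of A's OPT array
def kad : Int → List Int → List Int
  | _, [] => []
  | acc, t :: ts => (if acc ≤ 0 then t else acc + t) :: kad (if acc ≤ 0 then t else acc + t) ts

theorem kad_length (acc : Int) (ts : List Int) : (kad acc ts).length = ts.length := by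
  induction ts generalizing acc with
  | nil => rfl
  | cons t ts ih => simp [kad, ih]

theorem kad_getD_zero (acc : Int) (ts : List Int) (h : ts ≠ []) :
    (kad acc ts).getD 0 0 = if acc ≤ 0 then ts.getD 0 0 else acc + ts.getD 0 0 := by
  cases ts with
  | nil => exact absurd rfl h
  | cons t ts => simp [kad]

theorem kad_getD_succ (acc : Int) (ts : List Int) (i : Nat) (h : i + 1 < ts.length) :
    (kad acc ts).getD (i + 1) 0 =
      if (kad acc ts).getD i 0 ≤ 0 then ts.getD (i + 1) 0
      else (kad acc ts).getD i 0 + ts.getD (i + 1) 0 := by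
  induction ts generalizing acc i with
  | nil => simp at h
  | cons t ts ih =>
    cases i with
    | zero =>
      have hne : ts ≠ [] := by
        cases ts with
        | nil => simp at h
        | cons _ _ => simp
      simpa [kad] using kad_getD_zero (if acc ≤ 0 then t else acc + t) ts hne
    | succ j =>
      have hj : j + 1 < ts.length := by simpa using h
      simpa [kad] using ih (if acc ≤ 0 then t else acc + t) j hj

-- the reconstruction prefix of length k produced after processing indices < k
def recoPre (terrenos : List Int) (k : Nat) : List Int :=
  (-1 : Int) :: (List.range (k - 1)).map
    (fun j => if (kad 0 terrenos).getD j 0 ≤ 0 then (-1 : Int) else (j : Int))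

theorem recoPre_length (terrenos : List Int) (k : Nat) (hk : 1 ≤ k) :
    (recoPre terrenos k).length = k := by
  simp [recoPre]; omega

theorem set_append_replicate (xs : List Int) (m k : Nat) (hk : k = xs.length) (hm : 1 ≤ m)
    (x : Int) :
    (xs ++ List.replicate m (0 : Int)).set k x = xs ++ x :: List.replicate (m - 1) 0 := by
  obtain ⟨m', rfl⟩ : ∃ m', m = m' + 1 := ⟨m - 1, by omega⟩
  subst hk
  rw [List.set_append_right _ _ (le_refl _)]
  simp [List.replicate_succ]

theorem aloop_inv (terrenos : List Int) (h : terrenos ≠ []) (k : Nat) (hk1 : 1 ≤ k)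
    (hk : k ≤ terrenos.length) :
    (PySem.List.pyRange 1 (k : Int) 1).foldl (pvALoop terrenos)
        (PySem.List.pySetD (List.replicate terrenos.length 0) 0 (PySem.List.pyGetD terrenos 0 0),
         PySem.List.pySetD (List.replicate terrenos.length 0) 0 (-1)) =
      ((kad 0 terrenos).take k ++ List.replicate (terrenos.length - k) 0,
       recoPre terrenos k ++ List.replicate (terrenos.length - k) 0) := by
  revert hk
  induction k, hk1 using Nat.le_induction with
  | base =>
    intro hk
    rw [show ((1 : Nat) : Int) = 1 from rfl, PySem.List.pyRange_one_eq_nil (le_refl 1)]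
    cases terrenos with
    | nil => exact absurd rfl h
    | cons t ts =>
      simp only [List.foldl_nil, List.length_cons, List.replicate_succ]
      rw [PySem.List.pySetD_of_nonneg, PySem.List.pySetD_of_nonneg,
          PySem.List.pyGetD_zero_cons]
      · simp [kad, recoPre]
      · norm_num
      · norm_num
  | succ k hk1 ih =>
    intro hk
    have hkn : k < terrenos.length := by omega
    have hvlen : (kad 0 terrenos).length = terrenos.length := kad_length 0 terrenos
    have htlen : ((kad 0 terrenos).take k).length = k := by
      rw [List.length_take, hvlen]; omega
    rw [show (((k + 1 : Nat)) : Int) = (k : Int) + 1 by push_cast; ring,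
        PySem.List.pyRange_one_succ_right (by exact_mod_cast hk1), List.foldl_append,
        ih (by omega)]
    simp only [List.foldl_cons, List.foldl_nil]
    set v := kad 0 terrenos with hv
    set t := terrenos.getD k 0 with ht
    set prev := v.getD (k - 1) 0 with hprev
    have hcast : (k : Int) - 1 = ((k - 1 : Nat) : Int) := by omega
    have hOgetD : PySem.List.pyGetD (v.take k ++ List.replicate (terrenos.length - k) 0)
        ((k : Int) - 1) 0 = prev := by
      rw [hcast, PySem.List.pyGetD_natCast]
      rw [List.getD_eq_getElem?_getD, List.getElem?_append_left (by omega),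
          List.getElem?_take_of_lt (by omega), ← List.getD_eq_getElem?_getD]
    have hTgetD : PySem.List.pyGetD terrenos (k : Int) 0 = t := by
      rw [PySem.List.pyGetD_natCast]
    have hvk : v.getD k 0 = if prev ≤ 0 then t else prev + t := by
      have h1 : k - 1 + 1 = k := by omega
      have := kad_getD_succ 0 terrenos (k - 1) (by omega)
      rw [h1] at this
      exact this
    have hmax : max t (prev + t) = v.getD k 0 := by
      rw [hvk]
      by_cases hp : prev ≤ 0
      · rw [if_pos hp, max_eq_left (by omega)]
      · rw [if_neg hp, max_eq_right (by omega)]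
    have htake : v.take k ++ [v.getD k 0] = v.take (k + 1) := by
      rw [List.take_succ_eq_append_getElem (by omega),
          List.getD_eq_getElem v 0 (by omega)]
    have hOPT : PySem.List.pySetD (v.take k ++ List.replicate (terrenos.length - k) 0)
        (k : Int) (max (PySem.List.pyGetD terrenos (k : Int) 0)
          (PySem.List.pyGetD (v.take k ++ List.replicate (terrenos.length - k) 0) ((k : Int) - 1) 0 +
            PySem.List.pyGetD terrenos (k : Int) 0)) =
        v.take (k + 1) ++ List.replicate (terrenos.length - (k + 1)) 0 := by
      rw [hOgetD, hTgetD, PySem.List.pySetD_natCast, hmax,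
          set_append_replicate _ _ _ htlen.symm (by omega),
          show terrenos.length - k - 1 = terrenos.length - (k + 1) by omega,
          ← List.singleton_append, ← List.append_assoc, htake]
    have hrlen : (recoPre terrenos k).length = k := recoPre_length terrenos k hk1
    have hrecoPre : recoPre terrenos k ++ [if prev ≤ 0 then (-1 : Int) else (k : Int) - 1] =
        recoPre terrenos (k + 1) := by
      unfold recoPre
      rw [show k + 1 - 1 = (k - 1) + 1 from by omega, List.range_succ, List.map_append, hcast]
      simp [← hv]
      rw [hprev, List.getD_eq_getElem?_getD]
    have hRECO : ∀ val : Int, PySem.List.pySetD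
        (recoPre terrenos k ++ List.replicate (terrenos.length - k) 0) (k : Int) val =
        (recoPre terrenos k ++ [val]) ++ List.replicate (terrenos.length - (k + 1)) 0 := by
      intro val
      rw [PySem.List.pySetD_natCast, set_append_replicate _ _ _ hrlen.symm (by omega),
          show terrenos.length - k - 1 = terrenos.length - (k + 1) by omega,
          ← List.singleton_append, ← List.append_assoc]
    unfold pvALoop
    simp only
    rw [hOPT]
    by_cases hp : prev ≤ 0
    · rw [if_pos (by rw [hOgetD, hTgetD]; omega), hRECO (-1)]
      rw [if_pos hp] at hrecoPre
      rw [hrecoPre]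
    · rw [if_neg (by rw [hOgetD, hTgetD]; omega), hRECO ((k : Int) - 1)]
      rw [if_neg hp] at hrecoPre
      rw [hrecoPre]

-- ===== B-side lemmas: prefix sums, running minimum, and the bridge to kad =====

-- the stream of running sums starting from c (the tail of B's pref array)
def sums : Int → List Int → List Int
  | _, [] => []
  | c, t :: ts => (c + t) :: sums (c + t) ts

theorem sums_length (c : Int) (ts : List Int) : (sums c ts).length = ts.length := by
  induction ts generalizing c with
  | nil => rfl
  | cons t ts ih => simp [sums, ih]

theorem sums_getD_zero (c : Int) (ts : List Int) (h : ts ≠ []) :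
    (sums c ts).getD 0 0 = c + ts.getD 0 0 := by
  cases ts with
  | nil => exact absurd rfl h
  | cons t ts => simp [sums]

theorem sums_getD_succ (c : Int) (ts : List Int) (i : Nat) (h : i + 1 < ts.length) :
    (sums c ts).getD (i + 1) 0 = (sums c ts).getD i 0 + ts.getD (i + 1) 0 := by
  induction ts generalizing c i with
  | nil => simp at h
  | cons t ts ih =>
    cases i with
    | zero =>
      have hne : ts ≠ [] := by
        cases ts with
        | nil => simp at h
        | cons _ _ => simp
      simpa [sums] using sums_getD_zero (c + t) ts hne
    | succ j =>
      have hj : j + 1 < ts.length := by simpa using h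
      simpa [sums] using ih (c + t) j hj

theorem foldl_pvPrefStep (ts pre : List Int) (c : Int) :
    ts.foldl pvPrefStep (pre ++ [c]) = (pre ++ [c]) ++ sums c ts := by
  induction ts generalizing pre c with
  | nil => simp [sums]
  | cons t ts ih =>
    simp only [List.foldl_cons, sums]
    rw [show pvPrefStep (pre ++ [c]) t = (pre ++ [c]) ++ [c + t] by
          unfold pvPrefStep; rw [PySem.List.pyGetD_neg_one_append_singleton]]
    rw [show pre ++ [c] ++ [c + t] = (pre ++ [c]) ++ [c + t] from rfl, ih (pre ++ [c]) (c + t)]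
    simp

-- the running minimum of pref[0..i]  (pref = 0 :: sums 0 ts)
def mp (ts : List Int) : Nat → Int
  | 0 => 0
  | i + 1 => min (mp ts i) ((sums 0 ts).getD i 0)

-- bridge: the Kadane value at i is pref[i+1] minus the minimum prefix among pref[0..i]
theorem kad_eq_sums_sub_mp (ts : List Int) (i : Nat) (h : i < ts.length) :
    (kad 0 ts).getD i 0 = (sums 0 ts).getD i 0 - mp ts i := by
  induction i with
  | zero =>
    have hne : ts ≠ [] := by intro h0; rw [h0] at h; simp at h
    rw [kad_getD_zero 0 ts hne, if_pos (le_refl 0), sums_getD_zero 0 ts hne]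
    simp [mp]
  | succ j ih =>
    have hj : j < ts.length := by omega
    rw [kad_getD_succ 0 ts j h, sums_getD_succ 0 ts j h, ih hj]
    show _ = _ - min (mp ts j) ((sums 0 ts).getD j 0)
    by_cases hp : (sums 0 ts).getD j 0 - mp ts j ≤ 0
    · rw [if_pos hp, min_eq_right (by omega)]; ring
    · rw [if_neg hp, min_eq_left (by omega)]; ring

theorem bloop_inv (terrenos : List Int) (_h : terrenos ≠ []) (k : Nat) (hk1 : 1 ≤ k)
    (hk : k ≤ terrenos.length) :
    (PySem.List.pyRange 1 (k : Int) 1).foldl (pvBLoop ((0 : Int) :: sums 0 terrenos))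
        ([(-1 : Int)], PySem.List.pyGetD ((0 : Int) :: sums 0 terrenos) 0 0) =
      (recoPre terrenos k, mp terrenos (k - 1)) := by
  revert hk
  induction k, hk1 using Nat.le_induction with
  | base =>
    intro hk
    rw [show ((1 : Nat) : Int) = 1 from rfl, PySem.List.pyRange_one_eq_nil (le_refl 1),
        PySem.List.pyGetD_zero_cons]
    simp [recoPre, mp]
  | succ k hk1 ih =>
    intro hk
    have hkn : k < terrenos.length := by omega
    rw [show (((k + 1 : Nat)) : Int) = (k : Int) + 1 by push_cast; ring,
        PySem.List.pyRange_one_succ_right (by exact_mod_cast hk1), List.foldl_append,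
        ih (by omega)]
    simp only [List.foldl_cons, List.foldl_nil]
    have hslen : (sums 0 terrenos).length = terrenos.length := sums_length 0 terrenos
    have hgetk : PySem.List.pyGetD ((0 : Int) :: sums 0 terrenos) (k : Int) 0 =
        (sums 0 terrenos).getD (k - 1) 0 := by
      rw [PySem.List.pyGetD_natCast]
      obtain ⟨k', rfl⟩ : ∃ k', k = k' + 1 := ⟨k - 1, by omega⟩
      simp
    have hbridge : (kad 0 terrenos).getD (k - 1) 0 =
        (sums 0 terrenos).getD (k - 1) 0 - mp terrenos (k - 1) :=
      kad_eq_sums_sub_mp terrenos (k - 1) (by omega)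
    have hcond : ((sums 0 terrenos).getD (k - 1) 0 ≤ mp terrenos (k - 1)) =
        ((kad 0 terrenos).getD (k - 1) 0 ≤ 0) := by
      rw [hbridge, eq_iff_iff]; omega
    have hmp : min (mp terrenos (k - 1)) ((sums 0 terrenos).getD (k - 1) 0) =
        mp terrenos k := by
      obtain ⟨k', rfl⟩ : ∃ k', k = k' + 1 := ⟨k - 1, by omega⟩
      simp [mp]
    have hreco : recoPre terrenos k ++
        [if (kad 0 terrenos).getD (k - 1) 0 ≤ 0 then (-1 : Int) else (k : Int) - 1] =
        recoPre terrenos (k + 1) := by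
      unfold recoPre
      rw [show k + 1 - 1 = (k - 1) + 1 from by omega, List.range_succ, List.map_append]
      simp only [List.cons_append, List.map_cons, List.map_nil]
      congr 3
      omega
    unfold pvBLoop
    simp only [hgetk, hcond, hmp]
    rw [hreco]
    simp

-- ===== VERDICT (by name: the statement is the Claim_ definition above) =====
theorem terrenos_contiguos_spec : Claim_equal_terrenos_contiguos := by
  intro terrenos _ hpre
  have hn : 0 < terrenos.length := List.length_pos_of_ne_nil hpre
  have hvlen : (kad 0 terrenos).length = terrenos.length := kad_length 0 terrenos
  have hslen : (sums 0 terrenos).length = terrenos.length := sums_length 0 terrenos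
  unfold Spec_terrenos_contiguos terrenos_contiguos terrenos_contiguos_alt
  simp only
  rw [show ([(0 : Int)] : List Int) = ([] : List Int) ++ [(0 : Int)] by simp] 
  rw [foldl_pvPrefStep terrenos [] 0]
  simp only [List.nil_append, List.singleton_append]
  rw [aloop_inv terrenos hpre terrenos.length hn (le_refl _),
      bloop_inv terrenos hpre terrenos.length hn (le_refl _)]
  simp only [Nat.sub_self, List.replicate_zero, List.append_nil,
             List.take_of_length_le (le_of_eq hvlen)]
  congr 1
  -- the returned sum: kad value at n-1 = pref[n] - mp (n-1)
  have hcast : ((terrenos.length : Nat) : Int) - 1 = ((terrenos.length - 1 : Nat) : Int) := by omega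
  rw [hcast, PySem.List.pyGetD_natCast, PySem.List.pyGetD_natCast,
      kad_eq_sums_sub_mp terrenos (terrenos.length - 1) (by omega)]
  congr 1
  obtain ⟨n', hn'⟩ : ∃ n', terrenos.length = n' + 1 := ⟨terrenos.length - 1, by omega⟩
  rw [hn']
  simp
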